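-- pv_equiv track=rewrite | github.com/timenbob/Kattis-naloge | pikemaneasy.py | funkcija
-- ===== SOURCE A (Python) =====
-- MOD=1000000007
--
-- def funkcija(n,cas,seznam):
--     skupni_cas=0
--     kazne = 0
--     for i,t in enumerate(seznam):#cifra problema,casek
--         if skupni_cas + t > cas:# pogledamo ce smo ze prisli cez cas
--             return i, kazne
--         skupni_cas += t
--         kazne = (kazne + skupni_cas) % MOD #po formuli
--     return n, kazne #če nismo prišli čez čas
-- ===== SOURCE B (Python) =====
-- MOD = 1000000007
--
-- def funkcija(n, cas, seznam):
--     # Phase 1: count how many tasks fit by spending down the remaining time budget.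
--     remaining = cas
--     cut = None
--     for j, t in enumerate(seznam):
--         if t > remaining:
--             cut = j
--             break
--         remaining -= t
--     m = len(seznam) if cut is None else cut
--     # Phase 2: closed-form penalty. Task j (0-based) appears in every running time
--     # of tasks j..m-1, so it contributes (m - j) * t_j to the total penalty.
--     penalty = sum((m - j) * t for j, t in enumerate(seznam[:m])) % MOD
--     return (n if cut is None else cut), penalty
-- ===== Notes on version B (the rewrite author's own statement) =====
-- stated objective: alternative
-- what changed: A accumulates running times and a running mod-reduced sum of them; B never forms running times for the penalty: it finds the cut-off by counting down a remaining time budget, then computes the penalty by the closed-form weighted sum sum((m-j)*t_j) of the raw task times, with one final modulo.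
import Mathlib
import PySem

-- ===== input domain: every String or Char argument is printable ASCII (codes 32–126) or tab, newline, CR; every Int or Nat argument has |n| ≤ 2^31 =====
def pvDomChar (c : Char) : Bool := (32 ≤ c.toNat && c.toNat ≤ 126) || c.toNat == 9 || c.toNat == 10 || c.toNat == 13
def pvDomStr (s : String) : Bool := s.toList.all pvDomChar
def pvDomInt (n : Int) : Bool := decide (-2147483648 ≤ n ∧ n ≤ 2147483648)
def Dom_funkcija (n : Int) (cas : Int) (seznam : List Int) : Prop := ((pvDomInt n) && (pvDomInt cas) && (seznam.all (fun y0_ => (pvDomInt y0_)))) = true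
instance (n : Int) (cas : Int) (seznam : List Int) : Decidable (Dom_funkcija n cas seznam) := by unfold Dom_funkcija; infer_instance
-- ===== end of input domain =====

-- B finds the cut-off by spending down a remaining time budget and computes the penalty
-- by the closed-form weighted sum Σ (m-j)·t_j of the raw task times with one final modulo,
-- instead of A's fused loop over running times with an incrementally reduced penalty.

-- ===== PORT A =====
-- A's loop: state (i, skupni_cas, kazne), early return when skupni_cas + t > cas
def funkcijaGoA (n : Int) (cas : Int) : List Int → Int → Int → Int → Int × Int
  | [], _i, _sc, k => (n, k)
  | t :: rest, i, sc, k =>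
      if sc + t > cas then (i, k)
      else funkcijaGoA n cas rest (i + 1) (sc + t) (PySem.Int.mod (k + (sc + t)) 1000000007)

def funkcija (n : Int) (cas : Int) (seznam : List Int) : Int × Int :=
  funkcijaGoA n cas seznam 0 0 0

-- ===== PORT B =====
-- Phase 1 of Source B: the budget-spending loop; returns the break index (cut), none if no break
def funkcijaCut : List Int → Int → Int → Option Int
  | [], _remaining, _j => none
  | t :: rest, remaining, j =>
      if t > remaining then some j else funkcijaCut rest (remaining - t) (j + 1)

def funkcija_alt (n : Int) (cas : Int) (seznam : List Int) : Int × Int :=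
  let cut := funkcijaCut seznam cas 0
  let m : Int := match cut with | none => (seznam.length : Int) | some j => j
  -- Phase 2 of Source B: sum((m - j) * t for j, t in enumerate(seznam[:m])) % MOD
  let penalty := PySem.Int.mod
      (((PySem.List.enumerate (PySem.List.slice seznam none (some m))).map
          (fun p => (m - p.1) * p.2)).sum) 1000000007
  ((match cut with | none => n | some j => j), penalty)

-- ===== PRECONDITION & SPEC =====
def Spec_funkcija (n : Int) (cas : Int) (seznam : List Int) (out : Int × Int) : Prop := out = funkcija_alt n cas seznam
instance (n : Int) (cas : Int) (seznam : List Int) (out : Int × Int) : Decidable (Spec_funkcija n cas seznam out) := by unfold Spec_funkcija; infer_instance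

-- ===== CLAIM (what is proved, stated in full; the proofs are below) =====
def Claim_equal_funkcija : Prop := ∀ (n : Int) (cas : Int) (seznam : List Int), Dom_funkcija n cas seznam → Spec_funkcija n cas seznam (funkcija n cas seznam)

-- ===== LEMMAS AND PROOFS =====

-- proof-only reference objects: the prefix-sum list and a scan for its first element > cas
def funkcijaCum : List Int → Int → List Int
  | [], _ => []
  | t :: rest, s => (s + t) :: funkcijaCum rest (s + t)

def funkcijaFind (cas : Int) : List Int → Int → Option Int
  | [], _ => none
  | c :: rest, k => if c > cas then some k else funkcijaFind cas rest (k + 1)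

lemma funkcijaPMod (a : Int) : PySem.Int.mod a 1000000007 = a % 1000000007 :=
  PySem.Int.mod_eq_emod_of_pos (by norm_num)

lemma funkcijaFind_shift (cas : Int) (l : List Int) (d : Int) :
    funkcijaFind cas l d = (funkcijaFind cas l 0).map (· + d) := by
  induction l generalizing d with
  | nil => simp [funkcijaFind]
  | cons c rest ih =>
    simp only [funkcijaFind]
    split_ifs with h
    · simp
    · rw [ih (d + 1), ih (0 + 1)]
      cases funkcijaFind cas rest 0 <;> simp [add_comm, add_left_comm]

lemma funkcijaFind_bounds (cas : Int) (l : List Int) (d j : Int)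
    (h : funkcijaFind cas l d = some j) : d ≤ j ∧ j < d + l.length := by
  induction l generalizing d with
  | nil => simp [funkcijaFind] at h
  | cons c rest ih =>
    simp only [funkcijaFind] at h
    split_ifs at h with hc
    · simp only [Option.some.injEq] at h
      simp only [List.length_cons]
      omega
    · have := ih (d + 1) h
      simp only [List.length_cons]
      omega

lemma funkcijaModAdd (a b : Int) :
    PySem.Int.mod (PySem.Int.mod a 1000000007 + b) 1000000007 = PySem.Int.mod (a + b) 1000000007 := by
  simp only [funkcijaPMod]
  exact Int.emod_add_emod a 1000000007 b

-- A-side invariant: the fused loop equals a scan over the prefix-sum list of the rest.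
lemma funkcijaGoA_eq (n cas : Int) (l : List Int) (i' sc k : Int)
    (hk : PySem.Int.mod k 1000000007 = k) :
    funkcijaGoA n cas l i' sc k =
      match funkcijaFind cas (funkcijaCum l sc) 0 with
      | none => (n, PySem.Int.mod (k + (funkcijaCum l sc).sum) 1000000007)
      | some j => (i' + j, PySem.Int.mod (k + ((funkcijaCum l sc).take j.toNat).sum) 1000000007) := by
  induction l generalizing i' sc k with
  | nil => simpa [funkcijaGoA, funkcijaCum, funkcijaFind] using hk.symm
  | cons t rest ih =>
    simp only [funkcijaGoA, funkcijaCum, funkcijaFind]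
    split_ifs with h
    · simpa using hk.symm
    · rw [ih (i' + 1) (sc + t) _ (by
        simp only [funkcijaPMod]; exact Int.emod_emod_of_dvd _ dvd_rfl)]
      rw [funkcijaFind_shift cas (funkcijaCum rest (sc + t)) (0 + 1)]
      cases hfind : funkcijaFind cas (funkcijaCum rest (sc + t)) 0 with
      | none =>
        simp only [Option.map_none, List.sum_cons]
        rw [funkcijaModAdd]
        congr 2
        ring
      | some j =>
        have hj : 0 ≤ j := (funkcijaFind_bounds cas _ 0 j hfind).1
        simp only [Option.map_some]
        have htn : (j + (0 + 1)).toNat = j.toNat + 1 := by omega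
        rw [htn]
        simp only [List.take_succ_cons, List.sum_cons]
        rw [funkcijaModAdd]
        simp only [Prod.mk.injEq]
        constructor
        · ring
        · congr 1; ring

-- B's budget-spending scan finds exactly the first prefix sum exceeding cas.
lemma funkcijaCut_eq_find (cas : Int) (l : List Int) (sc j : Int) :
    funkcijaCut l (cas - sc) j = funkcijaFind cas (funkcijaCum l sc) j := by
  induction l generalizing sc j with
  | nil => simp [funkcijaCut, funkcijaCum, funkcijaFind]
  | cons t rest ih =>
    simp only [funkcijaCut, funkcijaCum, funkcijaFind]
    by_cases h : sc + t > cas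
    · have h' : t > cas - sc := by omega
      simp [h, h']
    · have h' : ¬ t > cas - sc := by omega
      have hst : cas - sc - t = cas - (sc + t) := by ring
      simp only [if_neg h, if_neg h', hst, ih (sc + t) (j + 1)]

-- B's weighted sum of raw times equals the sum of the prefix-sum list.
lemma funkcijaCum_sum_eq (xs : List Int) (sc r : Int) :
    (funkcijaCum xs sc).sum =
      ((PySem.List.enumerate xs r).map (fun p => ((r + (xs.length : Int)) - p.1) * p.2)).sum
        + (xs.length : Int) * sc := by
  induction xs generalizing sc r with
  | nil => simp [funkcijaCum, PySem.List.enumerate_nil]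
  | cons t rest ih =>
    simp only [funkcijaCum, List.sum_cons, PySem.List.enumerate_cons, List.map_cons,
      List.length_cons]
    rw [ih (sc + t) (r + 1)]
    push_cast
    have hmap : ((r : Int) + 1) + (rest.length : Int) = r + ((rest.length : Int) + 1) := by ring
    rw [hmap]
    ring

lemma funkcijaCum_length (xs : List Int) (s : Int) : (funkcijaCum xs s).length = xs.length := by
  induction xs generalizing s with
  | nil => simp [funkcijaCum]
  | cons t rest ih => simp [funkcijaCum, ih]

lemma funkcijaCum_take (xs : List Int) (s : Int) (k : Nat) :
    (funkcijaCum xs s).take k = funkcijaCum (xs.take k) s := by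
  induction xs generalizing s k with
  | nil => simp [funkcijaCum]
  | cons t rest ih =>
    cases k with
    | zero => simp [funkcijaCum]
    | succ k' => simp [funkcijaCum, ih]

lemma funkcijaSliceTake (l : List Int) (j : Int) (hj : 0 ≤ j) :
    PySem.List.slice l none (some j) = l.take j.toNat := by
  have hcast : j = ((j.toNat : Nat) : Int) := by omega
  rw [hcast, PySem.List.slice_to_natCast, Int.toNat_natCast]

-- ===== VERDICT (by name: the statement is the Claim_ definition above) =====
theorem funkcija_spec : Claim_equal_funkcija := by
  intro n cas seznam _
  unfold Spec_funkcija funkcija funkcija_alt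
  rw [funkcijaGoA_eq n cas seznam 0 0 0 (by decide)]
  have hcut : funkcijaCut seznam cas 0 = funkcijaFind cas (funkcijaCum seznam 0) 0 := by
    have := funkcijaCut_eq_find cas seznam 0 0
    simpa using this
  rw [hcut]
  cases hfind : funkcijaFind cas (funkcijaCum seznam 0) 0 with
  | none =>
    simp only [zero_add]
    rw [funkcijaSliceTake seznam (seznam.length : Int) (by positivity)]
    simp only [Int.toNat_natCast, List.take_length]
    rw [funkcijaCum_sum_eq seznam 0 0]
    simp
  | some j =>
    have hb := funkcijaFind_bounds cas (funkcijaCum seznam 0) 0 j hfind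
    rw [funkcijaCum_length] at hb
    have hj : 0 ≤ j := hb.1
    have hjl : j.toNat ≤ seznam.length := by omega
    simp only [zero_add]
    rw [funkcijaSliceTake seznam j hj, funkcijaCum_take]
    rw [funkcijaCum_sum_eq (seznam.take j.toNat) 0 0]
    have hlen : ((seznam.take j.toNat).length : Int) = j := by
      rw [List.length_take]
      omega
    rw [hlen]
    simp
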